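-- pv_equiv track=rewrite | github.com/RavenDS/flatout-blender-tools | scripts/pctops2-bgm.py | extract_strips_from_pc_strip
-- ===== SOURCE A (Python) =====
-- def extract_strips_from_pc_strip(indices):
--     """Extract sub-strips from PC mode=5 strip (split at degenerate triangles).
--     Returns list of (strip_vertex_indices, winding_offset) tuples.
--     winding_offset: 0 = first triangle uses even winding, 1 = odd winding.
--
--     In a standard triangle strip, triangle i uses vertices (i, i+1, i+2).
--     If i is even → even winding (v0,v1,v2), if i is odd → odd winding (v1,v0,v2).
--
--     Key insight: when we find a degenerate at position i, the last VALID triangle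
--     was at position i-1, which uses vertices[i-1], vertices[i], vertices[i+1].
--     So the sub-strip must include up to index i+1 inclusive = indices[start : i+2].
--     """
--     if len(indices) < 3:
--         return []
--
--     strips = []
--     i = 0
--     strip_start = 0
--
--     while i + 2 < len(indices):
--         a, b, c = indices[i], indices[i+1], indices[i+2]
--         is_degen = (a == b or b == c or a == c)
--
--         if is_degen:
--             # end current strip: include vertices up to i+1 (last valid tri uses i-1,i,i+1)
--             end = i + 2  # exclusive: indices[strip_start:i+2] gives vertices through index i+1
--             if end - strip_start >= 3:
--                 sub = indices[strip_start:end]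
--                 strips.append((sub, strip_start % 2))
--             # advance past this and any subsequent degenerates
--             i += 1
--             while i + 2 < len(indices):
--                 a2, b2, c2 = indices[i], indices[i+1], indices[i+2]
--                 if a2 == b2 or b2 == c2 or a2 == c2:
--                     i += 1
--                 else:
--                     break
--             strip_start = i
--         else:
--             i += 1
--
--     # Final strip
--     if len(indices) - strip_start >= 3:
--         sub = indices[strip_start:len(indices)]
--         strips.append((sub, strip_start % 2))
--
--     return strips
-- ===== SOURCE B (Python) =====
-- def extract_strips_from_pc_strip(indices):
--     """Cut-point algorithm: list all degenerate triangle positions once, then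
--     pair each run's start with the next cut to emit the sub-strips directly."""
--     n = len(indices)
--     if n < 3:
--         return []
--     cuts = [j for j in range(n - 2)
--             if indices[j] == indices[j + 1] or indices[j + 1] == indices[j + 2]
--             or indices[j] == indices[j + 2]]
--     starts = [0] + [d + 1 for d in cuts]
--     ends = cuts + [n - 2]
--     return [(indices[s:e + 2], s % 2) for s, e in zip(starts, ends) if s < e]
-- ===== Notes on version B (the rewrite author's own statement) =====
-- stated objective: alternative
-- what changed: Replaces A's stateful while-loop with inner degenerate-skipping by a cut-point construction: collect all degenerate positions once, then zip each run start (cut+1) with the next cut and emit a strip per pair with a positive gap.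
import Mathlib
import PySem

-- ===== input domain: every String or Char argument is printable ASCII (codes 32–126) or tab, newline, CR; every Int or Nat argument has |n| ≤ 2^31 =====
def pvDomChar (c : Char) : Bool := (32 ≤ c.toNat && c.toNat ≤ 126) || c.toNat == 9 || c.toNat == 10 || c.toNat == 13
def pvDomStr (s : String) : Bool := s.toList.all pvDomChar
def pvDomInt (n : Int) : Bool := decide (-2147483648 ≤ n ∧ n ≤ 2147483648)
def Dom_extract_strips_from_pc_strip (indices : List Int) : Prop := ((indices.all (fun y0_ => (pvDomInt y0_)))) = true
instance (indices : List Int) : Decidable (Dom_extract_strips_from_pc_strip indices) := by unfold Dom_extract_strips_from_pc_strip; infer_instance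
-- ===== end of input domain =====

-- B replaces A's stateful while-loop (with its inner degenerate-skipping loop)
-- by a cut-point construction: list all degenerate positions once, then zip
-- each run start with the next cut and emit one strip per positive gap
-- (objective: alternative algorithm, same asymptotic cost).

-- ===== PORT A =====
-- all list indexing below is guarded by i + 2 < length, so getD is exact;
-- slices have nonnegative in-range bounds, so drop/take is exact Python slicing
def pcDegenAt (indices : List Int) (i : Nat) : Bool :=
  indices.getD i 0 == indices.getD (i+1) 0 ||
  indices.getD (i+1) 0 == indices.getD (i+2) 0 ||
  indices.getD i 0 == indices.getD (i+2) 0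

-- A's inner "advance past subsequent degenerates" while-loop
def pcSkip (indices : List Int) (i : Nat) : Nat :=
  if i + 2 < indices.length then
    if pcDegenAt indices i then pcSkip indices (i + 1) else i
  else i
termination_by indices.length - i

theorem pcSkip_ge (indices : List Int) (i : Nat) : i ≤ pcSkip indices i := by
  unfold pcSkip
  split
  · split
    · have := pcSkip_ge indices (i + 1); omega
    · omega
  · omega
termination_by indices.length - i

-- A's outer while-loop
def pcLoop (indices : List Int) (i strip_start : Nat)
    (strips : List (List Int × Int)) : List (List Int × Int) :=
  if i + 2 < indices.length then
    if pcDegenAt indices i then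
      let strips' := if 3 ≤ i + 2 - strip_start then
          strips ++ [((indices.drop strip_start).take (i + 2 - strip_start),
                      ((strip_start : Int)) % 2)]
        else strips
      let i' := pcSkip indices (i + 1)
      pcLoop indices i' i' strips'
    else pcLoop indices (i + 1) strip_start strips
  else
    if 3 ≤ indices.length - strip_start then
      strips ++ [(indices.drop strip_start, ((strip_start : Int)) % 2)]
    else strips
termination_by indices.length - i
decreasing_by
  · have := pcSkip_ge indices (i + 1); omega
  · omega

def extract_strips_from_pc_strip (indices : List Int) : List (List Int × Int) :=
  if indices.length < 3 then [] else pcLoop indices 0 0 []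

-- ===== PORT B =====
-- B's degeneracy test (same triple comparison, B's own helper)
def bDegen (indices : List Int) (j : Nat) : Bool :=
  indices.getD j 0 == indices.getD (j+1) 0 ||
  indices.getD (j+1) 0 == indices.getD (j+2) 0 ||
  indices.getD j 0 == indices.getD (j+2) 0

def extract_strips_from_pc_strip_alt (indices : List Int) : List (List Int × Int) :=
  let n := indices.length
  if n < 3 then [] else
    let cuts := (List.range (n - 2)).filter (fun j => bDegen indices j)
    let starts := 0 :: cuts.map (· + 1)
    let ends := cuts ++ [n - 2]
    ((starts.zip ends).filter (fun p => p.1 < p.2)).map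
      (fun p => ((indices.drop p.1).take (p.2 + 2 - p.1), ((p.1 : Int)) % 2))

-- ===== PRECONDITION & SPEC =====
def Spec_extract_strips_from_pc_strip (indices : List Int) (out : List (List Int × Int)) : Prop := out = extract_strips_from_pc_strip_alt indices
instance (indices : List Int) (out : List (List Int × Int)) : Decidable (Spec_extract_strips_from_pc_strip indices out) := by unfold Spec_extract_strips_from_pc_strip; infer_instance

-- ===== CLAIM (what is proved, stated in full; the proofs are below) =====
def Claim_equal_extract_strips_from_pc_strip : Prop := ∀ (indices : List Int), Dom_extract_strips_from_pc_strip indices → Spec_extract_strips_from_pc_strip indices (extract_strips_from_pc_strip indices)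

-- ===== LEMMAS AND PROOFS =====

-- degenerate positions from i upward (proof-side view of B's cut list)
def degFrom (indices : List Int) (i : Nat) : List Nat :=
  (List.range' i (indices.length - 2 - i)).filter (pcDegenAt indices)

-- recursive consumption of the cut list (common spec for both sides)
def gaps (indices : List Int) (s : Nat) : List Nat → List (List Int × Int)
  | [] => if 3 ≤ indices.length - s
          then [(indices.drop s, ((s : Int)) % 2)] else []
  | d :: ds =>
      (if s < d then [((indices.drop s).take (d + 2 - s), ((s : Int)) % 2)] else [])
        ++ gaps indices (d + 1) ds

theorem degFrom_nil (indices : List Int) (i : Nat)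
    (h : ¬ i + 2 < indices.length) : degFrom indices i = [] := by
  unfold degFrom
  have : indices.length - 2 - i = 0 := by omega
  simp [this]

theorem degFrom_step (indices : List Int) (i : Nat)
    (h : i + 2 < indices.length) :
    degFrom indices i =
      (if pcDegenAt indices i then [i] else []) ++ degFrom indices (i + 1) := by
  unfold degFrom
  have : indices.length - 2 - i = (indices.length - 2 - (i + 1)) + 1 := by omega
  rw [this, List.range'_succ, List.filter_cons]
  split <;> simp

-- skipping a block of degenerates leaves the gaps output unchanged
theorem gaps_skip (indices : List Int) (k : Nat) :
    ∀ j, indices.length - j ≤ k →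
      gaps indices j (degFrom indices j)
        = gaps indices (pcSkip indices j) (degFrom indices (pcSkip indices j)) := by
  induction k with
  | zero =>
    intro j hk
    rw [pcSkip]
    have : ¬ j + 2 < indices.length := by omega
    simp [this]
  | succ k ih =>
    intro j hk
    rw [pcSkip]
    by_cases hj : j + 2 < indices.length
    · by_cases hd : pcDegenAt indices j
      · simp only [hj, hd, if_true]
        rw [degFrom_step indices j hj]
        simp only [hd, if_true, List.cons_append, List.nil_append, gaps]
        have : ¬ j < j := by omega
        simp only [this, if_false, List.nil_append]
        exact ih (j + 1) (by omega)
      · simp [hj, hd]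
    · simp [hj]

-- main simulation: A's loop equals the gaps consumption of the remaining cuts
theorem pcLoop_eq_gaps (indices : List Int) (k : Nat) :
    ∀ (i ss : Nat) (acc : List (List Int × Int)),
      indices.length - i ≤ k → ss ≤ i →
      pcLoop indices i ss acc = acc ++ gaps indices ss (degFrom indices i) := by
  induction k with
  | zero =>
    intro i ss acc hk hss
    rw [pcLoop]
    have hi : ¬ i + 2 < indices.length := by omega
    rw [degFrom_nil indices i hi]
    simp only [hi, if_false, gaps]
    split <;> simp
  | succ k ih =>
    intro i ss acc hk hss
    by_cases hi : i + 2 < indices.length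
    · rw [pcLoop]
      simp only [hi, if_true]
      by_cases hd : pcDegenAt indices i
      · simp only [hd, if_true]
        rw [degFrom_step indices i hi]
        simp only [hd, if_true, List.cons_append, List.nil_append, gaps]
        have hge := pcSkip_ge indices (i + 1)
        rw [ih (pcSkip indices (i + 1)) (pcSkip indices (i + 1)) _ (by omega) (le_refl _)]
        rw [← gaps_skip indices (k + 1) (i + 1) (by omega)]
        have hiff : (3 ≤ i + 2 - ss) ↔ (ss < i) := by omega
        by_cases hlt : ss < i
        · have h3 : 3 ≤ i + 2 - ss := by omega
          simp [h3, hlt]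
        · have h3 : ¬ 3 ≤ i + 2 - ss := by omega
          simp [h3, hlt]
      · simp only [hd, if_false, Bool.false_eq_true]
        rw [degFrom_step indices i hi]
        simp only [hd, if_false, Bool.false_eq_true, List.nil_append]
        exact ih (i + 1) ss acc (by omega) (by omega)
    · rw [pcLoop]
      rw [degFrom_nil indices i hi]
      simp only [hi, if_false, gaps]
      split <;> simp
-- B's zip/filter/map over starts and ends equals the gaps consumption
theorem zip_eq_gaps (indices : List Int) (hn : 3 ≤ indices.length) :
    ∀ (D : List Nat) (s : Nat),
      (((s :: D.map (· + 1)).zip (D ++ [indices.length - 2])).filter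
          (fun p => p.1 < p.2)).map
        (fun p => ((indices.drop p.1).take (p.2 + 2 - p.1), ((p.1 : Int)) % 2))
        = gaps indices s D := by
  intro D
  induction D with
  | nil =>
    intro s
    simp only [List.map_nil, List.zip_cons_cons, List.nil_append, List.zip_nil_left,
      List.filter_cons, gaps]
    by_cases h : s < indices.length - 2
    · have h3 : 3 ≤ indices.length - s := by omega
      have hlen : indices.length - s ≤ indices.length - 2 + 2 - s := by omega
      simp only [h, decide_true, List.filter_nil, List.map_cons, List.map_nil, h3, if_true]
      rw [List.take_of_length_le (by simp; omega)]
    · have h3 : ¬ 3 ≤ indices.length - s := by omega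
      simp [h, h3]
  | cons d ds ih =>
    intro s
    simp only [List.map_cons, List.cons_append, List.zip_cons_cons, List.filter_cons, gaps]
    by_cases h : s < d
    · simp only [h, decide_true, if_true, List.map_cons, ih (d + 1)]
      simp
    · simp only [h, decide_false, Bool.false_eq_true, if_false, ih (d + 1)]
      simp

-- ===== VERDICT (by name: the statement is the Claim_ definition above) =====
theorem extract_strips_from_pc_strip_spec : Claim_equal_extract_strips_from_pc_strip := by
  intro indices _
  unfold Spec_extract_strips_from_pc_strip extract_strips_from_pc_strip
    extract_strips_from_pc_strip_alt
  by_cases h3 : indices.length < 3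
  · simp [h3]
  · simp only [h3, if_false]
    have hbd : (fun j => bDegen indices j) = pcDegenAt indices := rfl
    rw [hbd]
    rw [show List.range (indices.length - 2) = List.range' 0 (indices.length - 2) from
      List.range_eq_range']
    rw [show (List.range' 0 (indices.length - 2)).filter (pcDegenAt indices)
        = degFrom indices 0 from by unfold degFrom; norm_num]
    rw [zip_eq_gaps indices (by omega) (degFrom indices 0) 0]
    rw [pcLoop_eq_gaps indices indices.length 0 0 [] (by omega) (le_refl 0)]
    simp
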